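-- pv_equiv track=rewrite | github.com/dfilan/guess_that_axrp | guess_that_axrp/guess.py | nice_split
-- ===== SOURCE A (Python) =====
-- def nice_split(text_list: list[str], split_char: str) -> list[str]:
--     splitter = split_char + ' '
--     new_split = []
--     for entry in text_list:
--         sub_split = entry.split(splitter)
--         for (i, sec) in enumerate(sub_split):
--             thing_to_add = sec + split_char if i != len(sub_split) - 1 else sec
--             new_split.append(thing_to_add)
--     return new_split
-- ===== SOURCE B (Python) =====
-- def _scan(entry, splitter, split_char):
--     # one left-to-right scan: emit each finished piece (delimiter already attached)
--     pieces = []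
--     cur = []
--     rest = entry
--     while rest:
--         if rest.startswith(splitter):
--             pieces.append(''.join(cur) + split_char)
--             cur = []
--             rest = rest[len(splitter):]
--         else:
--             cur.append(rest[0])
--             rest = rest[1:]
--     pieces.append(''.join(cur))
--     return pieces
--
--
-- def nice_split(text_list: list, split_char: str) -> list:
--     splitter = split_char + ' '
--     out = []
--     for entry in text_list:
--         out.extend(_scan(entry, splitter, split_char))
--     return out
-- ===== Notes on version B (the rewrite author's own statement) =====
-- stated objective: alternative
-- what changed: Replaces str.split on delimiter+space followed by an enumerate loop that re-attaches the delimiter to all but the last piece with a single left-to-right scanner that matches the separator in place and emits each piece already finished, so no split list, no enumerate and no last-index conditional exist.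
import Mathlib
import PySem

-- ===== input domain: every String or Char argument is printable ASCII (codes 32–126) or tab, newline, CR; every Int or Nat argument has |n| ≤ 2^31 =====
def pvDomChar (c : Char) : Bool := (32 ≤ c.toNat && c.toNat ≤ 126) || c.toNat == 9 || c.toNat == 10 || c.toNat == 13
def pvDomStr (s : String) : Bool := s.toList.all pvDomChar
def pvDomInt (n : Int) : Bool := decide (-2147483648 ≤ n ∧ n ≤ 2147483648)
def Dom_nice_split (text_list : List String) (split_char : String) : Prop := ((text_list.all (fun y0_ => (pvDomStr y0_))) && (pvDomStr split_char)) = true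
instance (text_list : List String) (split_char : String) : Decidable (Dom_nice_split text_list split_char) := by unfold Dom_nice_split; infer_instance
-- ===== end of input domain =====

-- ===== PORT A =====
-- B re-implements nice_split (split on delimiter+space, re-attach delimiter, flatten) as a
-- single left-to-right scanner emitting finished pieces; same return value, no mutation.
def nice_split (text_list : List String) (split_char : String) : List String :=
  let splitter := split_char.toList ++ [' ']
  text_list.foldl (fun new_split entry =>
    let sub_split := PySem.Chars.splitOn entry.toList splitter
    (PySem.List.enumerate sub_split).foldl (fun ns p =>
      let thing_to_add :=
        if p.1 ≠ (sub_split.length : Int) - 1 then String.ofList (p.2 ++ split_char.toList)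
        else String.ofList p.2
      ns ++ [thing_to_add]) new_split) []

-- ===== PORT B =====
-- _scan from Source B: one pass over the characters; when the separator (split_char + ' ')
-- starts here, the current piece is emitted with split_char already attached.
def pvScanB (sc : List Char) : List Char → List Char → List String
  | [], cur => [String.ofList cur]
  | c :: rest, cur =>
    if (sc ++ [' ']).isPrefixOf (c :: rest) then
      String.ofList (cur ++ sc) :: pvScanB sc ((c :: rest).drop (sc ++ [' ']).length) []
    else
      pvScanB sc rest (cur ++ [c])
termination_by l _ => l.length
decreasing_by
  · simp only [List.length_drop, List.length_cons, List.length_append]; omega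
  · simp only [List.length_cons]; omega

def nice_split_alt (text_list : List String) (split_char : String) : List String :=
  text_list.foldl (fun out entry => out ++ pvScanB split_char.toList entry.toList []) []

-- ===== PRECONDITION & SPEC =====
def Spec_nice_split (text_list : List String) (split_char : String) (out : List String) : Prop := out = nice_split_alt text_list split_char
instance (text_list : List String) (split_char : String) (out : List String) : Decidable (Spec_nice_split text_list split_char out) := by unfold Spec_nice_split; infer_instance

-- ===== CLAIM (what is proved, stated in full; the proofs are below) =====
def Claim_equal_nice_split : Prop := ∀ (text_list : List String) (split_char : String), Dom_nice_split text_list split_char → Spec_nice_split text_list split_char (nice_split text_list split_char)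

-- ===== LEMMAS AND PROOFS =====

-- pieces → output strings: delimiter appended to every piece but the last
def pvDeco (sc : List Char) : List (List Char) → List String
  | [] => []
  | [x] => [String.ofList x]
  | x :: y :: t => String.ofList (x ++ sc) :: pvDeco sc (y :: t)

theorem pvGo_zero (sep : List Char) (l cur : List Char) (acc : List (List Char)) :
    PySem.Chars.splitOn.go sep 0 l cur acc = ((cur.reverse ++ l) :: acc).reverse := rfl

theorem pvGo_nil (sep : List Char) (f : Nat) (cur : List Char) (acc : List (List Char)) :
    PySem.Chars.splitOn.go sep (f + 1) [] cur acc = (cur.reverse :: acc).reverse := rfl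

theorem pvGo_cons (sep : List Char) (f : Nat) (c : Char) (rest cur : List Char)
    (acc : List (List Char)) :
    PySem.Chars.splitOn.go sep (f + 1) (c :: rest) cur acc =
      if sep.isPrefixOf (c :: rest) then
        PySem.Chars.splitOn.go sep f (List.drop sep.length (c :: rest)) [] (cur.reverse :: acc)
      else PySem.Chars.splitOn.go sep f rest (c :: cur) acc := rfl

theorem pvGo_acc (sep : List Char) :
    ∀ (f : Nat) (l cur : List Char) (acc : List (List Char)),
      PySem.Chars.splitOn.go sep f l cur acc =
        acc.reverse ++ PySem.Chars.splitOn.go sep f l cur [] := by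
  intro f
  induction f with
  | zero => intro l cur acc; simp [pvGo_zero]
  | succ f ih =>
    intro l cur acc
    cases l with
    | nil => simp [pvGo_nil]
    | cons c rest =>
      rw [pvGo_cons, pvGo_cons]
      by_cases h : sep.isPrefixOf (c :: rest)
      · simp only [h, if_true]
        rw [ih _ _ (cur.reverse :: acc), ih _ _ (cur.reverse :: [])]
        simp
      · simp only [h, Bool.false_eq_true, if_false]
        exact ih _ _ acc

theorem pvGo_ne_nil (sep : List Char) :
    ∀ (f : Nat) (l cur : List Char) (acc : List (List Char)),
      PySem.Chars.splitOn.go sep f l cur acc ≠ [] := by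
  intro f
  induction f with
  | zero => intro l cur acc; simp [pvGo_zero]
  | succ f ih =>
    intro l cur acc
    cases l with
    | nil => simp [pvGo_nil]
    | cons c rest =>
      rw [pvGo_cons]
      by_cases h : sep.isPrefixOf (c :: rest)
      · simp only [h, if_true]; exact ih _ _ _
      · simp only [h, Bool.false_eq_true, if_false]; exact ih _ _ _

theorem pvDeco_cons (sc x : List Char) (t : List (List Char)) (ht : t ≠ []) :
    pvDeco sc (x :: t) = String.ofList (x ++ sc) :: pvDeco sc t := by
  cases t with
  | nil => exact absurd rfl ht
  | cons y t' => rfl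

theorem pvScanB_eq_deco_go (sc : List Char) :
    ∀ (f : Nat) (l cur : List Char), l.length < f →
      pvScanB sc l cur = pvDeco sc (PySem.Chars.splitOn.go (sc ++ [' ']) f l cur.reverse []) := by
  intro f
  induction f with
  | zero => intro l cur h; omega
  | succ f ih =>
    intro l cur h
    cases l with
    | nil => simp [pvScanB, pvGo_nil, pvDeco]
    | cons c rest =>
      rw [pvScanB, pvGo_cons]
      by_cases hp : (sc ++ [' ']).isPrefixOf (c :: rest)
      · simp only [hp, if_true]
        rw [pvGo_acc]
        simp only [List.reverse_reverse, List.reverse_cons, List.reverse_nil, List.nil_append]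
        rw [List.singleton_append, pvDeco_cons _ _ _ (pvGo_ne_nil _ _ _ _ _)]
        congr 1
        have hlen : (List.drop (sc ++ [' ']).length (c :: rest)).length < f := by
          simp only [List.length_drop, List.length_cons, List.length_append] at *
          omega
        have := ih (List.drop (sc ++ [' ']).length (c :: rest)) [] hlen
        simpa using this
      · simp only [hp, Bool.false_eq_true, if_false]
        have : rest.length < f := by simp at h; omega
        have := ih rest (cur ++ [c]) this
        simpa using this

theorem pvScanB_eq_deco (sc : List Char) (l : List Char) :
    pvScanB sc l [] = pvDeco sc (PySem.Chars.splitOn l (sc ++ [' '])) := by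
  rw [PySem.Chars.splitOn]
  simpa using pvScanB_eq_deco_go sc (l.length + 1) l [] (by omega)

theorem pvInner_gen (sc : List Char) (n : Int) :
    ∀ (xs : List (List Char)) (s : Int) (ns : List String),
      s + xs.length - 1 = n →
      (PySem.List.enumerate xs s).foldl (fun ns p =>
          ns ++ [if p.1 ≠ n then String.ofList (p.2 ++ sc) else String.ofList p.2]) ns
        = ns ++ pvDeco sc xs := by
  intro xs
  induction xs with
  | nil => intro s ns h; simp [PySem.List.enumerate, pvDeco]
  | cons x t ih =>
    intro s ns h
    rw [PySem.List.enumerate_cons]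
    cases t with
    | nil =>
      have hs : s = n := by simp at h; omega
      simp [PySem.List.enumerate, pvDeco, hs, List.foldl]
    | cons y t' =>
      have hsne : s ≠ n := by simp at h ⊢; omega
      rw [List.foldl_cons]
      have hifs : (if (s : Int) ≠ n then String.ofList (x ++ sc) else String.ofList x)
          = String.ofList (x ++ sc) := by simp [hsne]
      have hrec : s + 1 + (y :: t').length - 1 = n := by simp at h ⊢; omega
      have hd : pvDeco sc (x :: y :: t') = String.ofList (x ++ sc) :: pvDeco sc (y :: t') := rfl
      rw [hifs, ih (s + 1) _ hrec, hd]
      simp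

theorem nice_split_eq (text_list : List String) (split_char : String) :
    nice_split text_list split_char = nice_split_alt text_list split_char := by
  unfold nice_split nice_split_alt
  have hbody : ∀ (acc : List String),
      text_list.foldl (fun new_split entry =>
        let sub_split := PySem.Chars.splitOn entry.toList (split_char.toList ++ [' '])
        (PySem.List.enumerate sub_split).foldl (fun ns p =>
          let thing_to_add :=
            if p.1 ≠ (sub_split.length : Int) - 1 then String.ofList (p.2 ++ split_char.toList)
            else String.ofList p.2
          ns ++ [thing_to_add]) new_split) acc
      = text_list.foldl (fun out entry => out ++ pvScanB split_char.toList entry.toList []) acc := by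
    induction text_list with
    | nil => intro acc; rfl
    | cons e tl ih =>
      intro acc
      rw [List.foldl_cons, List.foldl_cons, ih]
      congr 1
      rw [pvScanB_eq_deco]
      exact pvInner_gen split_char.toList _ _ 0 acc (by simp)
  exact hbody []

-- ===== VERDICT (by name: the statement is the Claim_ definition above) =====
theorem nice_split_spec : Claim_equal_nice_split := by
  intro text_list split_char _
  unfold Spec_nice_split
  exact nice_split_eq text_list split_char
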